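-- pv_equiv track=rewrite | github.com/allmwh/the_return_of_the_rings | function/utilities.py | seq_aa_check
-- ===== SOURCE A (Python) =====
-- def seq_aa_check(sequence):
--     '''
--     check 20 amino acid abbreviations are usual used. If not, replace with most similar letter
--     https://www.ncbi.nlm.nih.gov/Class/MLACourse/Modules/MolBioReview/iupac_aa_abbreviations.html
--
--     sequence: str, seqeunce
--     '''
--     amino_acids = ['A', 'R', 'N', 'D', 'C', 'Q', 'E', 'G', 'H', 'I', 'L', 'K', 'M', 'F', 'P', 'S', 'T', 'W', 'Y', 'V', '-']
--     sequence = sequence.replace('B', 'D').replace('Z', 'Q').replace('X', '-')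
--
--     new_seq = ''
--     for index, aa in enumerate(sequence):
--         if aa not in amino_acids:
--             new_seq = new_seq + '-'
--         else:
--             new_seq = new_seq + sequence[index]
--
--     return new_seq
-- ===== SOURCE B (Python) =====
-- # Run-based rebuild: substitute B/Z/X via one translate table, then copy maximal
-- # runs of standard letters by slicing and fill the gaps with '-'*gap, joined once.
-- _T = str.maketrans('BZX', 'DQ-')
-- _KEEP = frozenset('ARNDCQEGHILKMFPSTWYV-')
--
--
-- def seq_aa_check(sequence):
--     s = sequence.translate(_T)
--     parts = []
--     i, n = 0, len(s)
--     while i < n: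
--         j = i
--         while j < n and s[j] in _KEEP:
--             j += 1
--         parts.append(s[i:j])
--         k = j
--         while k < n and s[k] not in _KEEP:
--             k += 1
--         parts.append('-' * (k - j))
--         i = k
--     return ''.join(parts)
-- ===== Notes on version B (the rewrite author's own statement) =====
-- stated objective: faster
-- what changed: Replaces A's three whole-string replace passes plus a per-character enumerate/index loop with quadratic string concatenation by one translate-table pass and a run-based rebuild: a two-pointer scan that copies maximal runs of standard letters as slices and fills each gap with a replicated dash string, joined once.
import Mathlib
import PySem

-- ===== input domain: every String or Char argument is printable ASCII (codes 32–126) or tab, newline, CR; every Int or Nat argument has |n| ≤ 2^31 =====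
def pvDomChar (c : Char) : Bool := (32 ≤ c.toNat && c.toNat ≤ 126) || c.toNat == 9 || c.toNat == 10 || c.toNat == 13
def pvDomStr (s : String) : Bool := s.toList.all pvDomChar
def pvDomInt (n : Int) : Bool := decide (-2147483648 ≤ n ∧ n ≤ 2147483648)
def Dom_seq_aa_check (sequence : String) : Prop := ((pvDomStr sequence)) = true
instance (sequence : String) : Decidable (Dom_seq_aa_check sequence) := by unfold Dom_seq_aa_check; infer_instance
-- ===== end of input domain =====

-- B replaces A's three whole-string replace passes + per-character enumerate/index loop by
-- one translate-table pass followed by a run-based rebuild: copy maximal runs of standard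
-- letters as slices and fill each gap with a replicated dash string, joined once (measured faster: C-level translate/slicing instead of a per-character Python loop with += concatenation).

-- ===== PORT A =====
def pvAminoAcids : List Char :=
  ['A', 'R', 'N', 'D', 'C', 'Q', 'E', 'G', 'H', 'I', 'L', 'K', 'M', 'F', 'P', 'S', 'T', 'W', 'Y', 'V', '-']

def seq_aa_check (sequence : String) : String :=
  let s1 := PySem.Str.replace sequence "B" "D"
  let s2 := PySem.Str.replace s1 "Z" "Q"
  let s3 := PySem.Str.replace s2 "X" "-"
  let cs := s3.toList
  -- the enumerate loop; sequence[index] is always in range, Option.toList totalizes it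
  let new_seq := (PySem.List.enumerate cs 0).foldl
    (fun acc p =>
      if ¬ (p.2 ∈ pvAminoAcids) then acc ++ ['-']
      else acc ++ (PySem.List.pyGet? cs p.1).toList) []
  String.ofList new_seq

-- ===== PORT B =====
-- str.maketrans('BZX', 'DQ-') : a 3-entry table; translate looks each character up, identity if absent
def pvTransTable : PySem.Dict Char Char :=
  PySem.Dict.ofList [('B', 'D'), ('Z', 'Q'), ('X', '-')]

def pvKeep : PySem.Set Char := PySem.Set.ofList "ARNDCQEGHILKMFPSTWYV-".toList

-- the outer while loop: take the run of kept letters, then the gap, emit slice + '-'*gap, recurse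
def pvFill (cs : List Char) : List Char :=
  match cs with
  | [] => []
  | c :: t =>
    let good := (c :: t).takeWhile (fun x => decide (x ∈ pvKeep))
    let rest := (c :: t).dropWhile (fun x => decide (x ∈ pvKeep))
    let bad := rest.takeWhile (fun x => !decide (x ∈ pvKeep))
    let rest2 := rest.dropWhile (fun x => !decide (x ∈ pvKeep))
    good ++ List.replicate bad.length '-' ++ pvFill rest2
termination_by cs.length
decreasing_by
  by_cases hc : decide (c ∈ pvKeep) = true
  · have h1 : ((c :: t).dropWhile (fun x => decide (x ∈ pvKeep))).length ≤ t.length := by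
      simp only [List.dropWhile_cons, hc, if_true]
      exact List.length_dropWhile_le _ _
    calc (((c :: t).dropWhile (fun x => decide (x ∈ pvKeep))).dropWhile (fun x => !decide (x ∈ pvKeep))).length
        ≤ ((c :: t).dropWhile (fun x => decide (x ∈ pvKeep))).length := List.length_dropWhile_le _ _
      _ ≤ t.length := h1
      _ < (c :: t).length := by simp
  · have hc' : decide (c ∈ pvKeep) = false := by simp_all
    simp only [List.dropWhile_cons, hc', Bool.false_eq_true, if_false, Bool.not_false, if_true]
    calc (t.dropWhile (fun x => !decide (x ∈ pvKeep))).length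
        ≤ t.length := List.length_dropWhile_le _ _
      _ < (c :: t).length := by simp

def seq_aa_check_alt (sequence : String) : String :=
  let s := sequence.toList.map (fun c => pvTransTable.getD c c)
  String.ofList (pvFill s)

-- ===== PRECONDITION & SPEC =====
def Spec_seq_aa_check (sequence : String) (out : String) : Prop := out = seq_aa_check_alt sequence
instance (sequence : String) (out : String) : Decidable (Spec_seq_aa_check sequence out) := by unfold Spec_seq_aa_check; infer_instance

-- ===== CLAIM (what is proved, stated in full; the proofs are below) =====
def Claim_equal_seq_aa_check : Prop := ∀ (sequence : String), Dom_seq_aa_check sequence → Spec_seq_aa_check sequence (seq_aa_check sequence)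

-- ===== LEMMAS AND PROOFS =====

-- replacing a single character by a single character is a map over the characters
theorem pv_replace_go_single (b d : Char) :
    ∀ (fuel : Nat) (l acc : List Char), l.length ≤ fuel →
      PySem.Chars.replace.go [b] [d] fuel l acc
        = acc.reverse ++ l.map (fun c => if c = b then d else c) := by
  intro fuel
  induction fuel with
  | zero =>
    intro l acc h
    have : l = [] := List.length_eq_zero_iff.mp (Nat.le_zero.mp h)
    subst this
    simp [PySem.Chars.replace.go]
  | succ n ih =>
    intro l acc h
    cases l with
    | nil => simp [PySem.Chars.replace.go]
    | cons c t =>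
      have ht : t.length ≤ n := by simpa using h
      by_cases hc : c = b
      · subst hc
        have hpre : [c].isPrefixOf (c :: t) = true := by
          simp [List.isPrefixOf]
        simp only [PySem.Chars.replace.go, hpre, if_pos]
        rw [show List.drop [c].length (c :: t) = t by simp]
        rw [ih t ([d].reverse ++ acc) ht]
        simp
      · have hpre : [b].isPrefixOf (c :: t) = false := by
          simp [List.isPrefixOf]
          exact fun h' => absurd h'.symm hc
        simp only [PySem.Chars.replace.go, hpre]
        rw [if_neg (by simp)]
        rw [ih t (c :: acc) ht]
        simp [hc]

theorem pv_replace_single (b d : Char) (cs : List Char) :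
    PySem.Chars.replace cs [b] [d] = cs.map (fun c => if c = b then d else c) := by
  rw [PySem.Chars.replace, if_neg (by simp)]
  exact pv_replace_go_single b d cs.length cs [] le_rfl

theorem pv_flatMap_singleton {α β : Type} (g : α → β) (l : List α) :
    l.flatMap (fun x => [g x]) = l.map g := by
  induction l with
  | nil => rfl
  | cons a t ih => simp [List.flatMap_cons, ih]

-- A's enumerate/index loop computes the membership filter as a map
theorem pv_loop_eq_map (cs : List Char) :
    (PySem.List.enumerate cs 0).foldl
      (fun acc p =>
        if ¬ (p.2 ∈ pvAminoAcids) then acc ++ ['-']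
        else acc ++ (PySem.List.pyGet? cs p.1).toList) []
    = cs.map (fun c => if c ∈ pvAminoAcids then c else '-') := by
  have hfun : ∀ acc (p : Int × Char),
      (if ¬ (p.2 ∈ pvAminoAcids) then acc ++ ['-']
       else acc ++ (PySem.List.pyGet? cs p.1).toList)
      = acc ++ (if ¬ (p.2 ∈ pvAminoAcids) then ['-']
                else (PySem.List.pyGet? cs p.1).toList) := by
    intro acc p; split <;> rfl
  calc (PySem.List.enumerate cs 0).foldl
        (fun acc p =>
          if ¬ (p.2 ∈ pvAminoAcids) then acc ++ ['-']
          else acc ++ (PySem.List.pyGet? cs p.1).toList) []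
      = (PySem.List.enumerate cs 0).foldl
        (fun acc p => acc ++ (if ¬ (p.2 ∈ pvAminoAcids) then ['-']
                              else (PySem.List.pyGet? cs p.1).toList)) [] := by
        congr 1; funext acc p; exact hfun acc p
    _ = [] ++ (PySem.List.enumerate cs 0).flatMap
          (fun p => if ¬ (p.2 ∈ pvAminoAcids) then ['-']
                    else (PySem.List.pyGet? cs p.1).toList) :=
        PySem.List.foldl_append_eq_flatMap _ _ _
    _ = (PySem.List.enumerate cs 0).flatMap
          (fun p => [if p.2 ∈ pvAminoAcids then p.2 else '-']) := by
        rw [List.nil_append]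
        apply List.flatMap_congr
        intro p hp
        obtain ⟨k, hk, rfl⟩ := (PySem.List.mem_enumerate_iff cs 0 p).mp hp
        by_cases hm : cs[k] ∈ pvAminoAcids
        · simp [hm]
        · simp [hm]
    _ = (PySem.List.enumerate cs 0).map
          (fun p => if p.2 ∈ pvAminoAcids then p.2 else '-') := by
        exact pv_flatMap_singleton _ _
    _ = ((PySem.List.enumerate cs 0).map (fun p => p.2)).map
          (fun c => if c ∈ pvAminoAcids then c else '-') := by
        rw [List.map_map]; rfl
    _ = cs.map (fun c => if c ∈ pvAminoAcids then c else '-') := by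
        rw [PySem.List.map_snd_enumerate]

-- B's run loop computes the membership filter as a map (strong induction on length)
theorem pv_fill_eq_map : ∀ (n : Nat) (cs : List Char), cs.length ≤ n →
    pvFill cs = cs.map (fun c => if c ∈ pvKeep then c else '-') := by
  intro n
  induction n with
  | zero =>
    intro cs h
    have : cs = [] := List.length_eq_zero_iff.mp (Nat.le_zero.mp h)
    subst this; simp [pvFill]
  | succ n ih =>
    intro cs h
    match cs with
    | [] => simp [pvFill]
    | c :: t =>
      have ht : t.length ≤ n := by simpa using h
      rw [pvFill.eq_def]
      simp only []
      have hgood : ((c :: t).takeWhile (fun x => decide (x ∈ pvKeep))).map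
            (fun c => if c ∈ pvKeep then c else '-')
          = (c :: t).takeWhile (fun x => decide (x ∈ pvKeep)) := by
        rw [List.map_congr_left (g := id) ?_, List.map_id]
        intro x hx
        have hm := List.mem_takeWhile_imp hx
        simp only [decide_eq_true_eq] at hm
        simp [hm]
      have hbad : ((((c :: t).dropWhile (fun x => decide (x ∈ pvKeep))).takeWhile
              (fun x => !decide (x ∈ pvKeep))).map (fun c => if c ∈ pvKeep then c else '-'))
          = List.replicate (((c :: t).dropWhile (fun x => decide (x ∈ pvKeep))).takeWhile
              (fun x => !decide (x ∈ pvKeep))).length '-' := by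
        apply List.eq_replicate_iff.mpr
        refine ⟨by simp, ?_⟩
        intro x hx
        obtain ⟨y, hy, rfl⟩ := List.mem_map.mp hx
        have hm := List.mem_takeWhile_imp hy
        simp only [Bool.not_eq_true', decide_eq_false_iff_not] at hm
        simp [hm]
      have hlt : ((((c :: t).dropWhile (fun x => decide (x ∈ pvKeep))).dropWhile
            (fun x => !decide (x ∈ pvKeep)))).length ≤ n := by
        by_cases hc : decide (c ∈ pvKeep) = true
        · have h1 : ((c :: t).dropWhile (fun x => decide (x ∈ pvKeep))).length ≤ t.length := by
            simp only [List.dropWhile_cons, hc, if_true]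
            exact List.length_dropWhile_le _ _
          have h2 := List.length_dropWhile_le (fun x => !decide (x ∈ pvKeep))
            ((c :: t).dropWhile (fun x => decide (x ∈ pvKeep)))
          omega
        · have hc' : decide (c ∈ pvKeep) = false := by simpa using hc
          simp only [List.dropWhile_cons, hc', Bool.false_eq_true, if_false, Bool.not_false,
            if_true]
          have := List.length_dropWhile_le (fun x => !decide (x ∈ pvKeep)) t
          omega
      rw [ih _ hlt]
      conv_rhs =>
        rw [← List.takeWhile_append_dropWhile
              (p := fun x => decide (x ∈ pvKeep)) (l := c :: t),
            List.map_append,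
            ← List.takeWhile_append_dropWhile
              (p := fun x => !decide (x ∈ pvKeep))
              (l := (c :: t).dropWhile (fun x => decide (x ∈ pvKeep))),
            List.map_append, hgood, hbad]
      rw [List.append_assoc]

-- the translate table lookup, written pointwise
theorem pv_trans_eq (c : Char) :
    pvTransTable.getD c c
      = if c = 'B' then 'D' else if c = 'Z' then 'Q' else if c = 'X' then '-' else c := by
  by_cases hb : c = 'B'
  · subst hb; decide
  by_cases hz : c = 'Z'
  · subst hz; decide
  by_cases hx : c = 'X'
  · subst hx; decide
  simp only [if_neg hb, if_neg hz, if_neg hx]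
  simp [pvTransTable, PySem.Dict.ofList, PySem.Dict.update, PySem.Dict.getD_eq_get?_getD,
    PySem.Dict.get?_insert, hb, hz, hx, PySem.Dict.get?_empty]

-- per character, A's three substitutions + membership filter equal B's translate + keep filter
theorem pv_char_eq (c : Char) :
    (fun x => if x ∈ pvAminoAcids then x else '-')
      ((fun x => if x = 'X' then '-' else x)
        ((fun x => if x = 'Z' then 'Q' else x)
          ((fun x => if x = 'B' then 'D' else x) c)))
    = (fun x => if x ∈ pvKeep then x else '-') (pvTransTable.getD c c) := by
  rw [pv_trans_eq]
  by_cases hb : c = 'B'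
  · subst hb; decide
  by_cases hz : c = 'Z'
  · subst hz; decide
  by_cases hx : c = 'X'
  · subst hx; decide
  simp only [if_neg hb, if_neg hz, if_neg hx]
  have hmem : (c ∈ pvAminoAcids) ↔ (c ∈ pvKeep) := by
    rw [pvKeep, PySem.Set.mem_ofList]
    rfl
  by_cases hm : c ∈ pvAminoAcids
  · rw [if_pos hm, if_pos (hmem.mp hm)]
  · rw [if_neg hm, if_neg (fun h => hm (hmem.mpr h))]

-- ===== VERDICT (by name: the statement is the Claim_ definition above) =====
theorem seq_aa_check_spec : Claim_equal_seq_aa_check := by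
  intro sequence _
  show seq_aa_check sequence = seq_aa_check_alt sequence
  unfold seq_aa_check seq_aa_check_alt
  simp only [PySem.Str.toList_replace]
  rw [show ("B" : String).toList = ['B'] from rfl,
      show ("D" : String).toList = ['D'] from rfl,
      show ("Z" : String).toList = ['Z'] from rfl,
      show ("Q" : String).toList = ['Q'] from rfl,
      show ("X" : String).toList = ['X'] from rfl,
      show ("-" : String).toList = ['-'] from rfl]
  rw [pv_replace_single, pv_replace_single, pv_replace_single, pv_loop_eq_map,
      pv_fill_eq_map (sequence.toList.map (fun c => pvTransTable.getD c c)).length _ le_rfl]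
  simp only [List.map_map]
  congr 1
  exact List.map_congr_left (fun c _ => pv_char_eq c)
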